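-- pv_equiv track=rewrite | github.com/kashishbajaj0344-crypto/Kalki | modules/agents/safety/simulation_verifier.py | _generate_verification_recommendations
-- ===== SOURCE A (Python) =====
-- from typing import Dict, Any, List, Optional
--
-- def _generate_verification_recommendations(issues: List[str], simulation_type: str) -> List[str]:
--     """Generate recommendations based on verification issues"""
--     recommendations = []
--
--     if any("statistical" in issue.lower() for issue in issues):
--         recommendations.append("Improve statistical methodology and sample sizes")
--
--     if any("edge" in issue.lower() for issue in issues):
--         recommendations.append("Increase edge case coverage in simulation design")
--
--     if any("model" in issue.lower() for issue in issues):
--         recommendations.append("Validate and calibrate underlying models")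
--
--     if any("consequence" in issue.lower() for issue in issues):
--         recommendations.append("Enhance consequence modeling, especially long-term effects")
--
--     if any("uncertainty" in issue.lower() for issue in issues):
--         recommendations.append("Implement proper uncertainty quantification")
--
--     if any("validation" in issue.lower() for issue in issues):
--         recommendations.append("Add real-world validation and expert review")
--
--     # Type-specific recommendations
--     if simulation_type == "safety_critical":
--         recommendations.append("Implement additional safety verification layers")
--     elif simulation_type == "ethical_dilemma":
--         recommendations.append("Include ethical review board consultation")
--
--     return recommendations[:5]  # Limit to top 5
-- ===== SOURCE B (Python) =====
-- _TABLE = [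
--     ("statistical", "Improve statistical methodology and sample sizes"),
--     ("edge", "Increase edge case coverage in simulation design"),
--     ("model", "Validate and calibrate underlying models"),
--     ("consequence", "Enhance consequence modeling, especially long-term effects"),
--     ("uncertainty", "Implement proper uncertainty quantification"),
--     ("validation", "Add real-world validation and expert review"),
-- ]
--
-- def _generate_verification_recommendations(issues, simulation_type):
--     # One pass over issues: lowercase each issue once and collect every
--     # matched keyword; then emit recommendations in fixed table order.
--     matched = set()
--     for issue in issues:
--         low = issue.lower()
--         for kw, _ in _TABLE:
--             if kw in low:
--                 matched.add(kw)
--     recommendations = [rec for kw, rec in _TABLE if kw in matched]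
--     if simulation_type == "safety_critical":
--         recommendations.append("Implement additional safety verification layers")
--     elif simulation_type == "ethical_dilemma":
--         recommendations.append("Include ethical review board consultation")
--     return recommendations[:5]
-- ===== Notes on version B (the rewrite author's own statement) =====
-- stated objective: faster
-- what changed: Replaces six separate any()-scans of the issues list (each lowercasing every issue again) with a single pass that lowercases each issue once and collects matched keywords into a set, followed by an ordered table emission pass.
import Mathlib
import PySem

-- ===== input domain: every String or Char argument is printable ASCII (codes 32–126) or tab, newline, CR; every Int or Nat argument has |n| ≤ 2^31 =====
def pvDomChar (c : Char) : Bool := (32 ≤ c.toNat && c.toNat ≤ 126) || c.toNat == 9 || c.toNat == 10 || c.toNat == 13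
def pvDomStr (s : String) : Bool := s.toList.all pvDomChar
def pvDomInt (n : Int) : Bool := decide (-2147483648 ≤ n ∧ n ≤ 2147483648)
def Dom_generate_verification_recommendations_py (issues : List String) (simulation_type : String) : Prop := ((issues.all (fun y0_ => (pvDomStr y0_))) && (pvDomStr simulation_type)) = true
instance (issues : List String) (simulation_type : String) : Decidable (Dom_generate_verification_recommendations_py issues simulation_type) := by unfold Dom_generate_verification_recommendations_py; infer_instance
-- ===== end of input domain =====

-- B replaces A's six separate any()-scans (each lowercasing every issue again) by one
-- pass over issues collecting matched keywords into a set, then an ordered emission pass.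

-- ===== PORT A =====
def generate_verification_recommendations_py (issues : List String) (simulation_type : String) : List String :=
  let recommendations : List String := []
  let recommendations := if issues.any (fun issue => PySem.Str.isIn "statistical" (PySem.Str.lower issue)) then recommendations ++ ["Improve statistical methodology and sample sizes"] else recommendations
  let recommendations := if issues.any (fun issue => PySem.Str.isIn "edge" (PySem.Str.lower issue)) then recommendations ++ ["Increase edge case coverage in simulation design"] else recommendations
  let recommendations := if issues.any (fun issue => PySem.Str.isIn "model" (PySem.Str.lower issue)) then recommendations ++ ["Validate and calibrate underlying models"] else recommendations
  let recommendations := if issues.any (fun issue => PySem.Str.isIn "consequence" (PySem.Str.lower issue)) then recommendations ++ ["Enhance consequence modeling, especially long-term effects"] else recommendations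
  let recommendations := if issues.any (fun issue => PySem.Str.isIn "uncertainty" (PySem.Str.lower issue)) then recommendations ++ ["Implement proper uncertainty quantification"] else recommendations
  let recommendations := if issues.any (fun issue => PySem.Str.isIn "validation" (PySem.Str.lower issue)) then recommendations ++ ["Add real-world validation and expert review"] else recommendations
  let recommendations :=
    if simulation_type == "safety_critical" then recommendations ++ ["Implement additional safety verification layers"]
    else if simulation_type == "ethical_dilemma" then recommendations ++ ["Include ethical review board consultation"]
    else recommendations
  PySem.List.slice recommendations none (some 5)

-- ===== PORT B =====
def pvTable : List (String × String) :=
  [("statistical", "Improve statistical methodology and sample sizes"),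
   ("edge", "Increase edge case coverage in simulation design"),
   ("model", "Validate and calibrate underlying models"),
   ("consequence", "Enhance consequence modeling, especially long-term effects"),
   ("uncertainty", "Implement proper uncertainty quantification"),
   ("validation", "Add real-world validation and expert review")]

def generate_verification_recommendations_py_alt (issues : List String) (simulation_type : String) : List String :=
  let matched : PySem.Set String :=
    issues.foldl (fun matched issue =>
      let low := PySem.Str.lower issue
      pvTable.foldl (fun matched p => if PySem.Str.isIn p.1 low then PySem.Set.add matched p.1 else matched) matched)
      PySem.Set.empty
  let recommendations := (pvTable.filter (fun p => PySem.Set.contains matched p.1)).map Prod.snd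
  let recommendations :=
    if simulation_type == "safety_critical" then recommendations ++ ["Implement additional safety verification layers"]
    else if simulation_type == "ethical_dilemma" then recommendations ++ ["Include ethical review board consultation"]
    else recommendations
  PySem.List.slice recommendations none (some 5)

-- ===== PRECONDITION & SPEC =====
def Spec_generate_verification_recommendations_py (issues : List String) (simulation_type : String) (out : List String) : Prop := out = generate_verification_recommendations_py_alt issues simulation_type
instance (issues : List String) (simulation_type : String) (out : List String) : Decidable (Spec_generate_verification_recommendations_py issues simulation_type out) := by unfold Spec_generate_verification_recommendations_py; infer_instance

-- ===== CLAIM (what is proved, stated in full; the proofs are below) =====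
def Claim_equal_generate_verification_recommendations_py : Prop := ∀ (issues : List String) (simulation_type : String), Dom_generate_verification_recommendations_py issues simulation_type → Spec_generate_verification_recommendations_py issues simulation_type (generate_verification_recommendations_py issues simulation_type)

-- ===== LEMMAS AND PROOFS =====

-- membership after B's inner keyword loop over one lowered issue
theorem pv_inner_mem (t : List (String × String)) (m : PySem.Set String) (low k : String) :
    k ∈ t.foldl (fun matched p => if PySem.Str.isIn p.1 low then PySem.Set.add matched p.1 else matched) m ↔
      k ∈ m ∨ ∃ p ∈ t, p.1 = k ∧ PySem.Str.isIn k low = true := by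
  induction t generalizing m with
  | nil => simp
  | cons p t ih =>
    simp only [List.foldl_cons, ih, List.mem_cons]
    by_cases h : PySem.Str.isIn p.1 low = true
    · simp only [h, if_pos]
      rw [PySem.Set.mem_add]
      constructor
      · rintro ((hm | rfl) | ⟨q, hq, rfl, hk⟩)
        · exact Or.inl hm
        · exact Or.inr ⟨p, Or.inl rfl, rfl, h⟩
        · exact Or.inr ⟨q, Or.inr hq, rfl, hk⟩
      · rintro (hm | ⟨q, (rfl | hq), rfl, hk⟩)
        · exact Or.inl (Or.inl hm)
        · exact Or.inl (Or.inr rfl)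
        · exact Or.inr ⟨q, hq, rfl, hk⟩
    · simp only [h, if_neg, Bool.false_eq_true, not_false_eq_true]
      constructor
      · rintro (hm | ⟨q, hq, rfl, hk⟩)
        · exact Or.inl hm
        · exact Or.inr ⟨q, Or.inr hq, rfl, hk⟩
      · rintro (hm | ⟨q, (rfl | hq), rfl, hk⟩)
        · exact Or.inl hm
        · exact (h hk).elim
        · exact Or.inr ⟨q, hq, rfl, hk⟩

-- membership after B's outer pass over all issues
theorem pv_outer_mem (issues : List String) (m : PySem.Set String) (k : String) :
    k ∈ issues.foldl (fun matched issue =>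
        pvTable.foldl (fun matched p => if PySem.Str.isIn p.1 (PySem.Str.lower issue) then PySem.Set.add matched p.1 else matched) matched) m ↔
      k ∈ m ∨ ∃ i ∈ issues, (∃ p ∈ pvTable, p.1 = k) ∧ PySem.Str.isIn k (PySem.Str.lower i) = true := by
  induction issues generalizing m with
  | nil => simp
  | cons i t ih =>
    simp only [List.foldl_cons, ih, pv_inner_mem, List.mem_cons]
    constructor
    · rintro ((hm | ⟨p, hp, rfl, hk⟩) | ⟨j, hj, hpk, hk⟩)
      · exact Or.inl hm
      · exact Or.inr ⟨i, Or.inl rfl, ⟨p, hp, rfl⟩, hk⟩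
      · exact Or.inr ⟨j, Or.inr hj, hpk, hk⟩
    · rintro (hm | ⟨j, (rfl | hj), ⟨p, hp, rfl⟩, hk⟩)
      · exact Or.inl (Or.inl hm)
      · exact Or.inl (Or.inr ⟨p, hp, rfl, hk⟩)
      · exact Or.inr ⟨j, hj, ⟨p, hp, rfl⟩, hk⟩

-- B's matched-set test equals A's any()-scan, for any keyword of the table
theorem pv_contains_matched (issues : List String) (kw : String) (hkw : ∃ p ∈ pvTable, p.1 = kw) :
    PySem.Set.contains
      (issues.foldl (fun matched issue =>
        pvTable.foldl (fun matched p => if PySem.Str.isIn p.1 (PySem.Str.lower issue) then PySem.Set.add matched p.1 else matched) matched)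
        PySem.Set.empty) kw
      = issues.any (fun issue => PySem.Str.isIn kw (PySem.Str.lower issue)) := by
  rw [Bool.eq_iff_iff, PySem.Set.contains_iff, pv_outer_mem, List.any_eq_true]
  constructor
  · rintro (hm | ⟨i, hi, _, hk⟩)
    · cases hm
    · exact ⟨i, hi, hk⟩
  · rintro ⟨i, hi, hk⟩
    exact Or.inr ⟨i, hi, hkw, hk⟩

-- B's emission pass over the concrete table equals A's six conditional appends
theorem pv_emit (issues : List String) :
    List.map Prod.snd (List.filter (fun p => PySem.Set.contains
        (issues.foldl (fun matched issue =>
          pvTable.foldl (fun matched p => if PySem.Str.isIn p.1 (PySem.Str.lower issue) then PySem.Set.add matched p.1 else matched) matched)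
          PySem.Set.empty) p.1) pvTable)
      =
    (let recommendations : List String := []
     let recommendations := if issues.any (fun issue => PySem.Str.isIn "statistical" (PySem.Str.lower issue)) then recommendations ++ ["Improve statistical methodology and sample sizes"] else recommendations
     let recommendations := if issues.any (fun issue => PySem.Str.isIn "edge" (PySem.Str.lower issue)) then recommendations ++ ["Increase edge case coverage in simulation design"] else recommendations
     let recommendations := if issues.any (fun issue => PySem.Str.isIn "model" (PySem.Str.lower issue)) then recommendations ++ ["Validate and calibrate underlying models"] else recommendations
     let recommendations := if issues.any (fun issue => PySem.Str.isIn "consequence" (PySem.Str.lower issue)) then recommendations ++ ["Enhance consequence modeling, especially long-term effects"] else recommendations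
     let recommendations := if issues.any (fun issue => PySem.Str.isIn "uncertainty" (PySem.Str.lower issue)) then recommendations ++ ["Implement proper uncertainty quantification"] else recommendations
     if issues.any (fun issue => PySem.Str.isIn "validation" (PySem.Str.lower issue)) then recommendations ++ ["Add real-world validation and expert review"] else recommendations) := by
  generalize h : (issues.foldl (fun matched issue =>
      pvTable.foldl (fun matched p => if PySem.Str.isIn p.1 (PySem.Str.lower issue) then PySem.Set.add matched p.1 else matched) matched)
      PySem.Set.empty) = M
  simp only [pvTable, List.filter_cons, List.filter_nil]
  rw [← h,
      pv_contains_matched issues "statistical" (by decide),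
      pv_contains_matched issues "edge" (by decide),
      pv_contains_matched issues "model" (by decide),
      pv_contains_matched issues "consequence" (by decide),
      pv_contains_matched issues "uncertainty" (by decide),
      pv_contains_matched issues "validation" (by decide)]
  split_ifs <;> simp

-- ===== VERDICT (by name: the statement is the Claim_ definition above) =====
theorem generate_verification_recommendations_py_spec : Claim_equal_generate_verification_recommendations_py := by
  intro issues simulation_type _
  unfold Spec_generate_verification_recommendations_py
  simp only [generate_verification_recommendations_py, generate_verification_recommendations_py_alt]
  rw [pv_emit]
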